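-- pv_equiv track=rewrite | github.com/clayelmore/Kaprekar-60714 | d7_audit/kaprekar_core.py | cycle_signature
-- ===== SOURCE A (Python) =====
-- def cycle_signature(pi, sigma):
--     """Cycle decomposition of pi · sigma^{-1}, returned as a sorted tuple of cycle lengths.
--
--     Cycle signatures recur in §6: (3,3) at d=6, (2,5) and (3,4) at d=7, etc.
--     """
--     d = len(pi)
--     sigma_inv = [0] * d
--     for i in range(d):
--         sigma_inv[sigma[i]] = i
--     # Composition perm[i] = pi[sigma_inv[i]]
--     perm = [pi[sigma_inv[i]] for i in range(d)]
--     seen = [False] * d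
--     cycles = []
--     for i in range(d):
--         if seen[i]:
--             continue
--         c = 0
--         j = i
--         while not seen[j]:
--             seen[j] = True
--             j = perm[j]
--             c += 1
--         cycles.append(c)
--     return tuple(sorted(cycles))
-- ===== SOURCE B (Python) =====
-- def cycle_signature(pi, sigma):
--     """Cycle decomposition of pi · sigma^{-1}, returned as a sorted tuple of cycle lengths.
--
--     The composition perm is built as in the definition; the lengths are then
--     found by minimum-label propagation (a standard connected-component
--     technique): every index starts as its own label, and labels flow along
--     the edges i -> perm[i] until a fixpoint, so each index ends up labelled
--     with the smallest index that reaches it.  Tallying the labels gives the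
--     component sizes, which for a permutation are exactly the cycle lengths.
--     """
--     d = len(pi)
--     sigma_inv = [0] * d
--     for i in range(d):
--         sigma_inv[sigma[i]] = i
--     perm = [pi[sigma_inv[i]] for i in range(d)]
--     label = list(range(d))
--     changed = True
--     while changed:
--         changed = False
--         for x in range(d):
--             if label[x] < label[perm[x]]:
--                 label[perm[x]] = label[x]
--                 changed = True
--     counts = {}
--     for l in label:
--         counts[l] = counts.get(l, 0) + 1
--     return tuple(sorted(counts.values()))
-- ===== Notes on version B (the rewrite author's own statement) =====
-- stated objective: alternative
-- what changed: B keeps the composition step but replaces the seen-array cycle walk by minimum-label propagation to a fixpoint plus a dict tally of the labels (order-independent component sizing instead of an order-dependent traversal); Pre_ keeps only inputs whose entries are in-range indices (len(sigma) >= d, sigma[:d] and pi within [-d,d)), a closed-form condition on the raw entries, which also drops the rare inputs whose out-of-range pi entry is never indexed and on which both programs still return the same value.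
-- outside the precondition, e.g. on cycle_signature([0, 99, 2], [1, 1, 1]): A returns (1, 2), B returns (1, 2)
import Mathlib
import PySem

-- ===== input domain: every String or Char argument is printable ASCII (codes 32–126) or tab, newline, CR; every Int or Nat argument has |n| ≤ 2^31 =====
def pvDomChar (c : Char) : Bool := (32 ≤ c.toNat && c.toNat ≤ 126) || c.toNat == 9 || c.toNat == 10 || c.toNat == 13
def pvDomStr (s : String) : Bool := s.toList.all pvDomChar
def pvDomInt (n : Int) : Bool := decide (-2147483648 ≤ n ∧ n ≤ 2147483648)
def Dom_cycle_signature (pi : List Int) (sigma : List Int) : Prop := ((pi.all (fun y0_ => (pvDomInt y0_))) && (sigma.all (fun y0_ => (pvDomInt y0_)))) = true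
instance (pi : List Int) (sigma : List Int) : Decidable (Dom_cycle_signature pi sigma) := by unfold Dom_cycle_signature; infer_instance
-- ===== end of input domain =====

-- B keeps the composition step but replaces A's seen-array cycle walk by minimum-label
-- propagation to a fixpoint plus a dict tally of the labels (order-independent component
-- sizing instead of an order-dependent traversal); objective: alternative.

-- ===== PORT A =====
-- inner while loop: while not seen[j]: seen[j] = True; j = perm[j]; c += 1
-- (fuel pi.length+1 suffices under Pre_: each loop body marks a fresh in-range index)
def walkA (perm : List Int) : Nat → List Bool → Int → Nat → (List Bool × Nat)
  | 0, seen, _, c => (seen, c)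
  | fuel+1, seen, j, c =>
    if PySem.List.pyGetD seen j false then (seen, c)
    else walkA perm fuel (PySem.List.pySetD seen j true) (PySem.List.pyGetD perm j 0) (c+1)

def cycle_signature (pi : List Int) (sigma : List Int) : List Int :=
  let d : Int := PySem.List.len pi
  let sigma_inv := (PySem.List.pyRange 0 d 1).foldl
      (fun acc i => PySem.List.pySetD acc (PySem.List.pyGetD sigma i 0) i)
      (List.replicate d.toNat 0)
  let perm := (PySem.List.pyRange 0 d 1).map
      (fun i => PySem.List.pyGetD pi (PySem.List.pyGetD sigma_inv i 0) 0)
  let res := (PySem.List.pyRange 0 d 1).foldl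
      (fun (st : List Bool × List Int) i =>
        if PySem.List.pyGetD st.1 i false then st
        else
          let w := walkA perm (pi.length + 1) st.1 i 0
          (w.1, st.2 ++ [(w.2 : Int)]))
      (List.replicate d.toNat false, [])
  PySem.List.sorted res.2 (fun x => x) false


-- ===== PORT B =====
-- one pass of the propagation for-loop: for x in range(d): if label[x] < label[perm[x]]: …
def passB (perm : List Int) (d : Int) (label : List Int) : List Int × Bool :=
  (PySem.List.pyRange 0 d 1).foldl
    (fun (st : List Int × Bool) x =>
      if PySem.List.pyGetD st.1 x 0 < PySem.List.pyGetD st.1 (PySem.List.pyGetD perm x 0) 0 then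
        (PySem.List.pySetD st.1 (PySem.List.pyGetD perm x 0) (PySem.List.pyGetD st.1 x 0), true)
      else st)
    (label, false)

-- outer while changed: loop; fuel d*d+1 suffices under Pre_: every changed pass strictly
-- decreases the (nonnegative) sum of the labels, which starts below d*d
def propagate (perm : List Int) (d : Int) : Nat → List Int → List Int
  | 0, label => label
  | fuel+1, label =>
    let st := passB perm d label
    if st.2 then propagate perm d fuel st.1 else st.1

def cycle_signature_alt (pi : List Int) (sigma : List Int) : List Int :=
  let d : Int := PySem.List.len pi
  let sigma_inv := (PySem.List.pyRange 0 d 1).foldl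
      (fun acc i => PySem.List.pySetD acc (PySem.List.pyGetD sigma i 0) i)
      (List.replicate d.toNat 0)
  let perm := (PySem.List.pyRange 0 d 1).map
      (fun i => PySem.List.pyGetD pi (PySem.List.pyGetD sigma_inv i 0) 0)
  let label := propagate perm d (pi.length * pi.length + 1) (PySem.List.pyRange 0 d 1)
  let counts := label.foldl
      (fun c l => PySem.Dict.insert c l (PySem.Dict.getD c l 0 + 1)) PySem.Dict.empty
  PySem.List.sorted (PySem.Dict.values counts) (fun x => x) false


-- ===== PRECONDITION & SPEC =====
-- Pre_ keeps the inputs whose entries are in-range (possibly negative) indices: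
-- len(sigma) ≥ d, sigma[:d] and pi within [-d, d).  Outside it A raises IndexError,
-- except on rare inputs whose out-of-range pi entry is never indexed (there both
-- programs still return the same value; the condition is on the raw entries to stay
-- closed-form).
def Pre_cycle_signature (pi : List Int) (sigma : List Int) : Prop :=
  pi.length ≤ sigma.length ∧
  (∀ v ∈ sigma.take pi.length, -(pi.length : Int) ≤ v ∧ v < (pi.length : Int)) ∧
  (∀ v ∈ pi, -(pi.length : Int) ≤ v ∧ v < (pi.length : Int))
instance (pi : List Int) (sigma : List Int) : Decidable (Pre_cycle_signature pi sigma) := by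
  unfold Pre_cycle_signature; infer_instance

def pvWitness_cycle_signature : List Int × List Int := ([1, 0, 2], [2, 1, 0])

def Spec_cycle_signature (pi : List Int) (sigma : List Int) (out : List Int) : Prop := out = cycle_signature_alt pi sigma
instance (pi : List Int) (sigma : List Int) (out : List Int) : Decidable (Spec_cycle_signature pi sigma out) := by unfold Spec_cycle_signature; infer_instance

-- ===== CLAIM (what is proved, stated in full; the proofs are below) =====
def Claim_equal_cycle_signature : Prop := ∀ (pi : List Int) (sigma : List Int), Dom_cycle_signature pi sigma → Pre_cycle_signature pi sigma → Spec_cycle_signature pi sigma (cycle_signature pi sigma)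

-- ===== LEMMAS AND PROOFS =====

-- Python's wraparound indexing as a map to a plain Nat index
def pvN (n : ℕ) (i : Int) : ℕ := (if i < 0 then i + (n : Int) else i).toNat

-- reachability in the functional graph of g, and the least index reaching y
def pvOrb (g : ℕ → ℕ) (x y : ℕ) : Prop := ∃ k, g^[k] x = y

noncomputable def pvComp (g : ℕ → ℕ) (y : ℕ) : ℕ := sInf {x | pvOrb g x y}

noncomputable def pvSize (d : ℕ) (g : ℕ → ℕ) (i : ℕ) : ℕ :=
  ((List.range d).filter (fun y => decide (pvComp g y = i))).length

noncomputable def pvSpecL (d : ℕ) (g : ℕ → ℕ) (i : ℕ) : List Int :=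
  (List.range i).foldl
    (fun acc m => if pvComp g m = m then acc ++ [((pvSize d g m : ℕ) : Int)] else acc) []

-- stopping predicate and stopping time of A's walk started at i
def pvStop (g : ℕ → ℕ) (i m : ℕ) : Prop :=
  pvComp g (g^[m] i) < i ∨ ∃ a < m, g^[a] i = g^[m] i

noncomputable def pvM (g : ℕ → ℕ) (i : ℕ) : ℕ := sInf {m | pvStop g i m}

theorem pvN_lt (d : ℕ) (v : Int) (h1 : -(d : Int) ≤ v) (h2 : v < (d : Int)) : pvN d v < d := by
  unfold pvN
  split_ifs with h <;> omega

theorem pyGetD_wrap {α : Type} (xs : List α) (i : Int) (dflt : α)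
    (h1 : -(xs.length : Int) ≤ i) (h2 : i < (xs.length : Int)) :
    PySem.List.pyGetD xs i dflt = xs.getD (pvN xs.length i) dflt := by
  by_cases h : 0 ≤ i
  · rw [PySem.List.pyGetD_eq_getElem (xs := xs) (i := i) (d := dflt) h h2, pvN, if_neg (by omega)]
    rw [List.getD_eq_getElem xs dflt (by omega)]
  · have hk : 0 < (-i).toNat := by omega
    have hk2 : (-i).toNat ≤ xs.length := by omega
    have hi : i = -(((-i).toNat : ℕ) : Int) := by omega
    rw [hi, PySem.List.pyGetD_neg_natCast xs (-i).toNat dflt hk hk2]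
    rw [pvN, if_pos (by omega)]
    rw [List.getD_eq_getElem xs dflt (by omega)]
    congr 1
    omega

theorem pySetD_wrap {α : Type} (xs : List α) (i : Int) (v : α)
    (h1 : -(xs.length : Int) ≤ i) (h2 : i < (xs.length : Int)) :
    PySem.List.pySetD xs i v = xs.set (pvN xs.length i) v := by
  by_cases h : 0 ≤ i
  · rw [PySem.List.pySetD_of_nonneg (xs := xs) (i := i) (v := v) h, pvN, if_neg (by omega)]
  · simp only [PySem.List.pySetD, PySem.List.pySet?, pvN]
    simp only [PySem.List.pyIdx?, if_neg h, if_pos h1, Option.map_some, Option.getD_some]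
    congr 1
    omega

theorem pv_iter_lt (d : ℕ) (g : ℕ → ℕ) (hg : ∀ x, x < d → g x < d) (n i : ℕ) (hi : i < d) :
    g^[n] i < d := by
  induction n with
  | zero => simpa using hi
  | succ n ih => rw [Function.iterate_succ_apply']; exact hg _ ih

theorem pvComp_le_self (g : ℕ → ℕ) (y : ℕ) : pvComp g y ≤ y :=
  Nat.sInf_le ⟨0, rfl⟩

theorem pvOrb_comp (g : ℕ → ℕ) (y : ℕ) : pvOrb g (pvComp g y) y := by
  have hy : y ∈ {x | pvOrb g x y} := ⟨0, rfl⟩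
  exact Nat.sInf_mem ⟨y, hy⟩

theorem pvComp_le_of_orb (g : ℕ → ℕ) (x y : ℕ) (h : pvOrb g x y) : pvComp g y ≤ x :=
  Nat.sInf_le h

theorem pvOrb_trans (g : ℕ → ℕ) (x y z : ℕ) (h1 : pvOrb g x y) (h2 : pvOrb g y z) :
    pvOrb g x z := by
  obtain ⟨a, ha⟩ := h1; obtain ⟨b, hb⟩ := h2
  exact ⟨b + a, by rw [Function.iterate_add_apply, ha, hb]⟩

theorem pvComp_mono (g : ℕ → ℕ) (x y : ℕ) (h : pvOrb g x y) : pvComp g y ≤ pvComp g x :=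
  pvComp_le_of_orb g _ y (pvOrb_trans g _ x y (pvOrb_comp g x) h)

theorem pvComp_iter (g : ℕ → ℕ) (k x : ℕ) : pvComp g (g^[k] x) ≤ pvComp g x :=
  pvComp_mono g x _ ⟨k, rfl⟩

theorem pvComp_idem (g : ℕ → ℕ) (y : ℕ) : pvComp g (pvComp g y) = pvComp g y := by
  have h1 : pvComp g (pvComp g y) ≤ pvComp g y := pvComp_le_self g _
  have h2 : pvComp g y ≤ pvComp g (pvComp g y) :=
    pvComp_le_of_orb g _ y (pvOrb_trans g _ (pvComp g y) y (pvOrb_comp g (pvComp g y)) (pvOrb_comp g y))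
  omega

-- the stopping time exists and is at most d
theorem pvStop_exists (d : ℕ) (g : ℕ → ℕ) (hg : ∀ x, x < d → g x < d) (i : ℕ) (hi : i < d) :
    ∃ m ≤ d, pvStop g i m := by
  have hmaps : ∀ k ∈ Finset.range (d+1), g^[k] i ∈ Finset.range d := by
    intro k _; simpa using pv_iter_lt d g hg k i hi
  have hcard : (Finset.range d).card < (Finset.range (d+1)).card := by simp
  obtain ⟨a, ha, b, hb, hne, heq⟩ :=
    Finset.exists_ne_map_eq_of_card_lt_of_maps_to hcard hmaps
  simp only [Finset.mem_range] at ha hb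
  rcases lt_or_gt_of_ne hne with hab | hab
  · exact ⟨b, by omega, Or.inr ⟨a, hab, heq⟩⟩
  · exact ⟨a, by omega, Or.inr ⟨b, hab, heq.symm⟩⟩

theorem pvM_le (d : ℕ) (g : ℕ → ℕ) (hg : ∀ x, x < d → g x < d) (i : ℕ) (hi : i < d) :
    pvM g i ≤ d := by
  obtain ⟨m, hm, hstop⟩ := pvStop_exists d g hg i hi
  have : pvM g i ≤ m := Nat.sInf_le (show m ∈ {m | pvStop g i m} from hstop)
  omega

theorem pvM_stop (d : ℕ) (g : ℕ → ℕ) (hg : ∀ x, x < d → g x < d) (i : ℕ) (hi : i < d) :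
    pvStop g i (pvM g i) := by
  obtain ⟨m, _, hstop⟩ := pvStop_exists d g hg i hi
  exact Nat.sInf_mem ⟨m, show m ∈ {m | pvStop g i m} from hstop⟩

theorem pvM_not_stop (g : ℕ → ℕ) (i m : ℕ) (hm : m < pvM g i) : ¬ pvStop g i m := by
  intro h
  have : pvM g i ≤ m := Nat.sInf_le (show m ∈ {m | pvStop g i m} from h)
  omega

-- nodes walked before the stop are fresh members of i's class
theorem pv_fresh (d : ℕ) (g : ℕ → ℕ) (hg : ∀ x, x < d → g x < d) (i : ℕ) (hi : i < d)
    (hld : pvComp g i = i) (a : ℕ) (ha : a < pvM g i) : pvComp g (g^[a] i) = i := by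
  have hnot := pvM_not_stop g i a ha
  unfold pvStop at hnot
  push_neg at hnot
  have h1 : pvComp g (g^[a] i) ≤ i := by
    have := pvComp_iter g a i
    omega
  have h2 := hnot.1
  omega

-- each member of i's class is reached strictly before the stop
theorem pv_cover (d : ℕ) (g : ℕ → ℕ) (hg : ∀ x, x < d → g x < d) (i : ℕ) (hi : i < d)
    (hld : pvComp g i = i) (y : ℕ) (hy : pvComp g y = i) :
    ∃ a < pvM g i, g^[a] i = y := by
  have horb : pvOrb g i y := by
    have := pvOrb_comp g y
    rwa [hy] at this
  have hne : ∃ k, k ∈ {k | g^[k] i = y} := horb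
  set k := sInf {k | g^[k] i = y} with hkdef
  have hkmem : g^[k] i = y := Nat.sInf_mem hne
  by_cases hkM : k < pvM g i
  · exact ⟨k, hkM, hkmem⟩
  exfalso
  have hstop := pvM_stop d g hg i hi
  rcases hstop with h1 | ⟨a, haM, heq⟩
  · have hXk : g^[k - pvM g i] (g^[pvM g i] i) = y := by
      rw [← Function.iterate_add_apply]
      rw [show k - pvM g i + pvM g i = k by omega]
      exact hkmem
    have := pvComp_mono g (g^[pvM g i] i) y ⟨k - pvM g i, hXk⟩
    omega
  · have hXk' : g^[k - pvM g i + a] i = y := by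
      rw [Function.iterate_add_apply, heq, ← Function.iterate_add_apply]
      rw [show k - pvM g i + pvM g i = k by omega]
      exact hkmem
    have hle : k ≤ k - pvM g i + a := Nat.sInf_le hXk'
    omega

-- the walk length is the class size
theorem pvM_size (d : ℕ) (g : ℕ → ℕ) (hg : ∀ x, x < d → g x < d) (i : ℕ) (hi : i < d)
    (hld : pvComp g i = i) : pvM g i = pvSize d g i := by
  have hnodup : ((List.range (pvM g i)).map (fun a => g^[a] i)).Nodup := by
    refine List.Nodup.map_on ?_ (List.nodup_range)
    intro a ha b hb hab
    simp only [List.mem_range] at ha hb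
    by_contra hne
    rcases Nat.lt_or_ge a b with h | h
    · exact pvM_not_stop g i b hb (Or.inr ⟨a, h, hab⟩)
    · have h' : b < a := by omega
      exact pvM_not_stop g i a ha (Or.inr ⟨b, h', hab.symm⟩)
  have hfn : ((List.range d).filter (fun y => decide (pvComp g y = i))).Nodup :=
    List.Nodup.filter _ (List.nodup_range)
  have hmem : ∀ y, y ∈ (List.range (pvM g i)).map (fun a => g^[a] i) ↔
      y ∈ (List.range d).filter (fun y => decide (pvComp g y = i)) := by
    intro y
    simp only [List.mem_map, List.mem_range, List.mem_filter, decide_eq_true_eq]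
    constructor
    · rintro ⟨a, ha, rfl⟩
      exact ⟨pv_iter_lt d g hg a i hi, pv_fresh d g hg i hi hld a ha⟩
    · rintro ⟨hy, hcy⟩
      obtain ⟨a, ha, he⟩ := pv_cover d g hg i hi hld y hcy
      exact ⟨a, ha, he⟩
  have hperm : ((List.range (pvM g i)).map (fun a => g^[a] i)).Perm
      ((List.range d).filter (fun y => decide (pvComp g y = i))) :=
    (List.perm_ext_iff_of_nodup hnodup hfn).mpr hmem
  have := hperm.length_eq
  simpa [pvSize] using this

theorem pvSpecL_succ (d : ℕ) (g : ℕ → ℕ) (i : ℕ) :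
    pvSpecL d g (i+1) =
      if pvComp g i = i then pvSpecL d g i ++ [((pvSize d g i : ℕ) : Int)]
      else pvSpecL d g i := by
  unfold pvSpecL
  rw [List.range_succ, List.foldl_append]
  rfl

-- ===== A-side: the walk and the outer fold =====

theorem walkA_run (d : ℕ) (g : ℕ → ℕ) (hg : ∀ x, x < d → g x < d)
    (p : List Int) (hplen : p.length = d)
    (hpv : ∀ v ∈ p, -(d : Int) ≤ v ∧ v < (d : Int))
    (hgdef : ∀ x, x < d → pvN d (p.getD x 0) = g x)
    (i : ℕ) (hi : i < d) (hld : pvComp g i = i) :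
    ∀ (fuel m : ℕ) (seen : List Bool) (c : ℕ) (j : Int),
      m ≤ pvM g i → pvM g i - m < fuel →
      -(d : Int) ≤ j → j < (d : Int) → pvN d j = g^[m] i →
      seen.length = d →
      (∀ y, y < d → (seen.getD y false = true ↔ (pvComp g y < i ∨ ∃ a < m, g^[a] i = y))) →
      ∃ seen', walkA p fuel seen j c = (seen', c + (pvM g i - m)) ∧ seen'.length = d ∧
        (∀ y, y < d → (seen'.getD y false = true ↔ (pvComp g y < i ∨ ∃ a < pvM g i, g^[a] i = y))) := by
  intro fuel
  induction fuel with
  | zero => intro m seen c j hm hfu _ _ _ _ _; omega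
  | succ fuel ih =>
    intro m seen c j hm hfu hj1 hj2 hjN hlen hseen
    have hXm : g^[m] i < d := pv_iter_lt d g hg m i hi
    rw [show walkA p (fuel+1) seen j c =
          (if PySem.List.pyGetD seen j false then (seen, c)
           else walkA p fuel (PySem.List.pySetD seen j true) (PySem.List.pyGetD p j 0) (c+1)) from rfl]
    have hgetseen : PySem.List.pyGetD seen j false = seen.getD (g^[m] i) false := by
      rw [pyGetD_wrap seen j false (by rw [hlen]; exact hj1) (by rw [hlen]; exact hj2)]
      rw [hlen, hjN]
    rcases Nat.lt_or_ge m (pvM g i) with hmlt | hmge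
    · have hnot := pvM_not_stop g i m hmlt
      unfold pvStop at hnot
      push_neg at hnot
      obtain ⟨hn1, hn2⟩ := hnot
      have hfalse : seen.getD (g^[m] i) false = false := by
        rcases Bool.eq_false_or_eq_true (seen.getD (g^[m] i) false) with h | h
        swap
        · exact h
        exfalso
        rcases (hseen _ hXm).mp h with hc | ⟨a, ha, heq⟩
        · omega
        · exact hn2 a ha heq
      rw [hgetseen, hfalse]
      simp only [Bool.false_eq_true, if_false]
      have hset : PySem.List.pySetD seen j true = seen.set (g^[m] i) true := by
        rw [pySetD_wrap seen j true (by rw [hlen]; exact hj1) (by rw [hlen]; exact hj2)]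
        rw [hlen, hjN]
      have hpj : PySem.List.pyGetD p j 0 = p.getD (g^[m] i) 0 := by
        rw [pyGetD_wrap p j 0 (by rw [hplen]; exact hj1) (by rw [hplen]; exact hj2)]
        rw [hplen, hjN]
      have hvmem : p.getD (g^[m] i) 0 ∈ p := by
        rw [List.getD_eq_getElem p 0 (by omega)]
        exact List.getElem_mem _
      obtain ⟨hv1, hv2⟩ := hpv _ hvmem
      have hnextN : pvN d (p.getD (g^[m] i) 0) = g^[m+1] i := by
        rw [hgdef _ hXm, Function.iterate_succ_apply']
      have hnewseen : ∀ y, y < d → ((seen.set (g^[m] i) true).getD y false = true ↔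
          (pvComp g y < i ∨ ∃ a < m + 1, g^[a] i = y)) := by
        intro y hy
        by_cases hyx : y = g^[m] i
        · have hsome : (seen.set (g^[m] i) true)[y]? = some true := by
            rw [hyx]
            rw [List.getElem?_set_self]
            omega
          have hT : (seen.set (g^[m] i) true).getD y false = true := by
            simp [List.getD, hsome]
          rw [hT]
          exact ⟨fun _ => Or.inr ⟨m, by omega, hyx.symm⟩, fun _ => rfl⟩
        · have hE : (seen.set (g^[m] i) true).getD y false = seen.getD y false := by
            simp [List.getD, List.getElem?_set_ne (fun h => hyx h.symm)]
          rw [hE, hseen y hy]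
          constructor
          · rintro (hc | ⟨a, ha, heq⟩)
            · exact Or.inl hc
            · exact Or.inr ⟨a, by omega, heq⟩
          · rintro (hc | ⟨a, ha, heq⟩)
            · exact Or.inl hc
            · refine Or.inr ⟨a, ?_, heq⟩
              rcases Nat.lt_or_ge a m with h | h
              · exact h
              · exfalso
                have : a = m := by omega
                subst this
                exact hyx heq.symm
      obtain ⟨seen', heq, hlen', hspec⟩ := ih (m+1) (seen.set (g^[m] i) true) (c+1)
        (p.getD (g^[m] i) 0) (by omega) (by omega) hv1 hv2 hnextN
        (by simpa using hlen) hnewseen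
      refine ⟨seen', ?_, hlen', hspec⟩
      rw [hset, hpj, heq]
      rw [show c + 1 + (pvM g i - (m+1)) = c + (pvM g i - m) by omega]
    · have hmeq : m = pvM g i := by omega
      have hstop := pvM_stop d g hg i hi
      rw [← hmeq] at hstop
      have htrue : seen.getD (g^[m] i) false = true := by
        rw [hseen _ hXm]
        rcases hstop with h1 | ⟨a, ha, heq⟩
        · exact Or.inl h1
        · exact Or.inr ⟨a, ha, heq⟩
      rw [hgetseen, htrue]
      simp only [if_true]
      refine ⟨seen, ?_, hlen, ?_⟩
      · rw [show c + (pvM g i - m) = c by omega]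
      · intro y hy
        rw [hseen y hy, hmeq]

def stepA (p : List Int) (fuel : ℕ) (st : List Bool × List Int) (k : Int) : List Bool × List Int :=
  if PySem.List.pyGetD st.1 k false then st
  else
    let w := walkA p fuel st.1 k 0
    (w.1, st.2 ++ [(w.2 : Int)])

theorem foldA_inv (d : ℕ) (g : ℕ → ℕ) (hg : ∀ x, x < d → g x < d)
    (p : List Int) (hplen : p.length = d)
    (hpv : ∀ v ∈ p, -(d : Int) ≤ v ∧ v < (d : Int))
    (hgdef : ∀ x, x < d → pvN d (p.getD x 0) = g x) :
    ∀ i, i ≤ d → ∃ seen,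
      (List.range i).foldl (fun st (k : ℕ) => stepA p (d+1) st ((k : ℕ) : Int))
        (List.replicate d false, ([] : List Int)) = (seen, pvSpecL d g i) ∧
      seen.length = d ∧
      (∀ y, y < d → (seen.getD y false = true ↔ pvComp g y < i)) := by
  intro i
  induction i with
  | zero =>
    intro _
    refine ⟨List.replicate d false, rfl, by simp, ?_⟩
    intro y hy
    constructor
    · intro h
      exfalso
      simp [List.getD, hy] at h
    · intro h
      omega
  | succ i ih =>
    intro hi1
    have hi : i < d := by omega
    obtain ⟨seen, heq, hlen, hspec⟩ := ih (by omega)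
    rw [List.range_succ, List.foldl_append, heq]
    simp only [List.foldl_cons, List.foldl_nil]
    have hgetI : PySem.List.pyGetD seen ((i : ℕ) : Int) false = seen.getD i false := by simp
    by_cases hld : pvComp g i = i
    · -- leader: run the walk
      have hsf : seen.getD i false = false := by
        rcases Bool.eq_false_or_eq_true (seen.getD i false) with h | h
        · exfalso
          have := (hspec i hi).mp h
          omega
        · exact h
      have hjN : pvN d ((i : ℕ) : Int) = g^[0] i := by
        unfold pvN
        rw [if_neg (by omega)]
        simp
      obtain ⟨seen', hwalk, hlen', hspec'⟩ := walkA_run d g hg p hplen hpv hgdef i hi hld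
        (d+1) 0 seen 0 ((i : ℕ) : Int) (by omega)
        (by have := pvM_le d g hg i hi; omega)
        (by omega) (by exact_mod_cast hi) hjN hlen
        (by
          intro y hy
          rw [hspec y hy]
          constructor
          · intro h
            exact Or.inl h
          · rintro (h | ⟨a, ha, _⟩)
            · exact h
            · omega)
      rw [show stepA p (d+1) (seen, pvSpecL d g i) ((i : ℕ) : Int) =
            ((walkA p (d+1) seen ((i : ℕ) : Int) 0).1,
             pvSpecL d g i ++ [((walkA p (d+1) seen ((i : ℕ) : Int) 0).2 : Int)]) from by
        unfold stepA
        rw [hgetI, hsf]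
        simp]
      rw [hwalk]
      simp only []
      refine ⟨seen', ?_, hlen', ?_⟩
      · rw [pvSpecL_succ, if_pos hld, pvM_size d g hg i hi hld]
        norm_num
      · intro y hy
        rw [hspec' y hy]
        constructor
        · rintro (h | ⟨a, ha, heq2⟩)
          · omega
          · have := pv_fresh d g hg i hi hld a ha
            rw [heq2] at this
            omega
        · intro h
          rcases Nat.lt_or_ge (pvComp g y) i with h2 | h2
          · exact Or.inl h2
          · have hcy : pvComp g y = i := by omega
            exact Or.inr (pv_cover d g hg i hi hld y hcy)
    · -- not a leader: skip
      have hlt : pvComp g i < i := lt_of_le_of_ne (pvComp_le_self g i) hld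
      have hs : seen.getD i false = true := (hspec i hi).mpr hlt
      rw [show stepA p (d+1) (seen, pvSpecL d g i) ((i : ℕ) : Int) = (seen, pvSpecL d g i) from by
        unfold stepA
        rw [hgetI, hs]
        simp]
      refine ⟨seen, by rw [pvSpecL_succ, if_neg hld], hlen, ?_⟩
      intro y hy
      rw [hspec y hy]
      constructor
      · intro h
        omega
      · intro h
        rcases Nat.lt_or_ge (pvComp g y) i with h2 | h2
        · exact h2
        · exfalso
          have hcy : pvComp g y = i := by omega
          have : pvComp g i = i := by
            conv_rhs => rw [← hcy]
            rw [← hcy, pvComp_idem]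
          exact hld this
      

-- ===== B-side: the propagation and the tally =====

-- label entry y of the state, as the step function of passB works on it
theorem pvSum_set (L : List Int) (t : ℕ) (w : Int) (ht : t < L.length) :
    (L.set t w).sum = L.sum - L.getD t 0 + w := by
  induction L generalizing t with
  | nil => simp at ht
  | cons a L ih =>
    cases t with
    | zero => simp [List.sum_cons]; omega
    | succ t =>
      simp only [List.set_cons_succ, List.sum_cons, List.getD_cons_succ]
      rw [ih t (by simpa using ht)]
      omega

def pvIlab (d : ℕ) (g : ℕ → ℕ) (L : List Int) : Prop :=
  L.length = d ∧ ∀ y, y < d → ((pvComp g y : Int) ≤ L.getD y 0 ∧ L.getD y 0 ≤ (y : Int))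

def pvStepB (p : List Int) (st : List Int × Bool) (x : Int) : List Int × Bool :=
  if PySem.List.pyGetD st.1 x 0 < PySem.List.pyGetD st.1 (PySem.List.pyGetD p x 0) 0 then
    (PySem.List.pySetD st.1 (PySem.List.pyGetD p x 0) (PySem.List.pyGetD st.1 x 0), true)
  else st

theorem passB_eval (p : List Int) (d : ℕ) (L : List Int) :
    passB p ((d : ℕ) : Int) L =
      (List.range d).foldl (fun st (x : ℕ) => pvStepB p st ((x : ℕ) : Int)) (L, false) := by
  unfold passB pvStepB
  simp only [PySem.List.pyRange_zero_natCast, List.foldl_map]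

theorem pvStepB_node (d : ℕ) (g : ℕ → ℕ) (hg : ∀ x, x < d → g x < d)
    (p : List Int) (hplen : p.length = d)
    (hpv : ∀ v ∈ p, -(d : Int) ≤ v ∧ v < (d : Int))
    (hgdef : ∀ x, x < d → pvN d (p.getD x 0) = g x)
    (M : List Int) (b : Bool) (hlen : M.length = d) (x : ℕ) (hx : x < d) :
    pvStepB p (M, b) ((x : ℕ) : Int) =
      if M.getD x 0 < M.getD (g x) 0 then (M.set (g x) (M.getD x 0), true) else (M, b) := by
  have hvmem : p.getD x 0 ∈ p := by
    rw [List.getD_eq_getElem p 0 (by omega)]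
    exact List.getElem_mem _
  obtain ⟨hv1, hv2⟩ := hpv _ hvmem
  have hv : PySem.List.pyGetD p ((x : ℕ) : Int) 0 = p.getD x 0 := by simp
  have h2 : PySem.List.pyGetD M (p.getD x 0) 0 = M.getD (g x) 0 := by
    rw [pyGetD_wrap M _ 0 (by rw [hlen]; exact hv1) (by rw [hlen]; exact hv2)]
    rw [hlen, hgdef _ hx]
  have h3 : PySem.List.pySetD M (p.getD x 0) (M.getD x 0) = M.set (g x) (M.getD x 0) := by
    rw [pySetD_wrap M _ _ (by rw [hlen]; exact hv1) (by rw [hlen]; exact hv2)]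
    rw [hlen, hgdef _ hx]
  unfold pvStepB
  simp only [hv, h2, h3, PySem.List.pyGetD_natCast]

theorem passB_fold (d : ℕ) (g : ℕ → ℕ) (hg : ∀ x, x < d → g x < d)
    (p : List Int) (hplen : p.length = d)
    (hpv : ∀ v ∈ p, -(d : Int) ≤ v ∧ v < (d : Int))
    (hgdef : ∀ x, x < d → pvN d (p.getD x 0) = g x)
    (L : List Int) (hI : pvIlab d g L) :
    ∀ n, n ≤ d →
      pvIlab d g ((List.range n).foldl (fun st (x : ℕ) => pvStepB p st ((x : ℕ) : Int)) (L, false)).1 ∧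
      ((List.range n).foldl (fun st (x : ℕ) => pvStepB p st ((x : ℕ) : Int)) (L, false)).1.sum ≤ L.sum ∧
      (((List.range n).foldl (fun st (x : ℕ) => pvStepB p st ((x : ℕ) : Int)) (L, false)).2 = false →
        ((List.range n).foldl (fun st (x : ℕ) => pvStepB p st ((x : ℕ) : Int)) (L, false)).1 = L ∧
        ∀ x, x < n → L.getD (g x) 0 ≤ L.getD x 0) ∧
      (((List.range n).foldl (fun st (x : ℕ) => pvStepB p st ((x : ℕ) : Int)) (L, false)).2 = true →
        ((List.range n).foldl (fun st (x : ℕ) => pvStepB p st ((x : ℕ) : Int)) (L, false)).1.sum < L.sum) := by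
  intro n
  induction n with
  | zero =>
    intro _
    refine ⟨hI, le_rfl, ?_, ?_⟩
    · intro _
      exact ⟨rfl, by intro x hx; omega⟩
    · intro h
      simp at h
  | succ n ih =>
    intro hn1
    have hn : n < d := by omega
    obtain ⟨hI', hsum', hfalse', htrue'⟩ := ih (by omega)
    set st := (List.range n).foldl (fun st (x : ℕ) => pvStepB p st ((x : ℕ) : Int)) (L, false) with hst
    rw [List.range_succ, List.foldl_append]
    simp only [List.foldl_cons, List.foldl_nil, ← hst]
    rw [show st = (st.1, st.2) from rfl]
    rw [pvStepB_node d g hg p hplen hpv hgdef st.1 st.2 hI'.1 n hn]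
    by_cases hcond : st.1.getD n 0 < st.1.getD (g n) 0
    · rw [if_pos hcond]
      have hgn : g n < d := hg n hn
      have hlen1 : st.1.length = d := hI'.1
      have hsumset : (st.1.set (g n) (st.1.getD n 0)).sum =
          st.1.sum - st.1.getD (g n) 0 + st.1.getD n 0 :=
        pvSum_set st.1 (g n) _ (by omega)
      have hIset : pvIlab d g (st.1.set (g n) (st.1.getD n 0)) := by
        refine ⟨by simpa using hlen1, ?_⟩
        intro y hy
        by_cases hy2 : y = g n
        · subst hy2
          have hgetset : (st.1.set (g n) (st.1.getD n 0)).getD (g n) 0 = st.1.getD n 0 := by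
            simp only [List.getD]
            rw [List.getElem?_set_self (show g n < st.1.length by omega)]
            rfl
          rw [hgetset]
          constructor
          · have hmono : pvComp g (g n) ≤ pvComp g n := pvComp_mono g n (g n) ⟨1, by simp⟩
            have := (hI'.2 n hn).1
            have hc : ((pvComp g (g n) : ℕ) : Int) ≤ ((pvComp g n : ℕ) : Int) := by
              exact_mod_cast hmono
            omega
          · have := (hI'.2 (g n) (hg n hn)).2
            omega
        · have hgetset : (st.1.set (g n) (st.1.getD n 0)).getD y 0 = st.1.getD y 0 := by
            simp only [List.getD]
            rw [List.getElem?_set_ne (fun h => hy2 h.symm)]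
          rw [hgetset]
          exact hI'.2 y hy
      refine ⟨hIset, ?_, ?_, ?_⟩
      · simp only []
        omega
      · intro h
        simp at h
      · intro _
        simp only []
        omega
    · rw [if_neg hcond]
      refine ⟨hI', hsum', ?_, htrue'⟩
      intro h
      obtain ⟨hL, hfix⟩ := hfalse' h
      refine ⟨hL, ?_⟩
      intro x hx
      rcases Nat.lt_or_ge x n with h2 | h2
      · exact hfix x h2
      · have hx2 : x = n := by omega
        subst hx2
        rw [hL] at hcond
        omega

theorem passB_spec (d : ℕ) (g : ℕ → ℕ) (hg : ∀ x, x < d → g x < d)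
    (p : List Int) (hplen : p.length = d)
    (hpv : ∀ v ∈ p, -(d : Int) ≤ v ∧ v < (d : Int))
    (hgdef : ∀ x, x < d → pvN d (p.getD x 0) = g x)
    (L : List Int) (hI : pvIlab d g L) :
    pvIlab d g (passB p (d : Int) L).1 ∧
    ((passB p (d : Int) L).2 = true → (passB p (d : Int) L).1.sum < L.sum) ∧
    ((passB p (d : Int) L).2 = false → (passB p (d : Int) L).1 = L ∧
      ∀ x, x < d → L.getD (g x) 0 ≤ L.getD x 0) := by
  have h := passB_fold d g hg p hplen hpv hgdef L hI d le_rfl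
  rw [passB_eval p d L]
  exact ⟨h.1, h.2.2.2, h.2.2.1⟩

theorem pv_fix_comp (d : ℕ) (g : ℕ → ℕ) (hg : ∀ x, x < d → g x < d)
    (L : List Int) (hI : pvIlab d g L)
    (hfix : ∀ x, x < d → L.getD (g x) 0 ≤ L.getD x 0) :
    ∀ y, y < d → L.getD y 0 = ((pvComp g y : ℕ) : Int) := by
  have chain : ∀ k x, x < d → L.getD (g^[k] x) 0 ≤ L.getD x 0 := by
    intro k
    induction k with
    | zero => intro x _; simp
    | succ k ih =>
      intro x hx
      rw [Function.iterate_succ_apply']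
      have h1 := hfix (g^[k] x) (pv_iter_lt d g hg k x hx)
      have h2 := ih x hx
      omega
  intro y hy
  have hx0 : pvComp g y < d := by
    have := pvComp_le_self g y
    omega
  obtain ⟨k, hk⟩ := pvOrb_comp g y
  have h1 : L.getD y 0 ≤ L.getD (pvComp g y) 0 := by
    have := chain k (pvComp g y) hx0
    rwa [hk] at this
  have h2 : L.getD (pvComp g y) 0 ≤ ((pvComp g y : ℕ) : Int) := (hI.2 _ hx0).2
  have h3 : ((pvComp g y : ℕ) : Int) ≤ L.getD y 0 := (hI.2 y hy).1
  omega

theorem propagate_spec (d : ℕ) (g : ℕ → ℕ) (hg : ∀ x, x < d → g x < d)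
    (p : List Int) (hplen : p.length = d)
    (hpv : ∀ v ∈ p, -(d : Int) ≤ v ∧ v < (d : Int))
    (hgdef : ∀ x, x < d → pvN d (p.getD x 0) = g x) :
    ∀ (fuel : ℕ) (L : List Int), pvIlab d g L → L.sum < (fuel : Int) →
      propagate p (d : Int) fuel L = (List.range d).map (fun y => ((pvComp g y : ℕ) : Int)) := by
  intro fuel
  induction fuel with
  | zero =>
    intro L hI hfuel
    exfalso
    have hnn : ∀ v ∈ L, (0 : Int) ≤ v := by
      intro v hv
      obtain ⟨idx, hidx, hvi⟩ := List.mem_iff_getElem.mp hv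
      have hidx2 : idx < d := by
        have := hI.1
        omega
      have := (hI.2 idx hidx2).1
      rw [List.getD_eq_getElem L 0 hidx, hvi] at this
      have : (0 : Int) ≤ ((pvComp g idx : ℕ) : Int) := by positivity
      omega
    have := List.sum_nonneg hnn
    simp at hfuel
    omega
  | succ fuel ih =>
    intro L hI hfuel
    obtain ⟨hI', htrue, hfalse⟩ := passB_spec d g hg p hplen hpv hgdef L hI
    rw [show propagate p ((d : ℕ) : Int) (fuel+1) L =
          (if (passB p ((d : ℕ) : Int) L).2 then propagate p ((d : ℕ) : Int) fuel (passB p ((d : ℕ) : Int) L).1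
           else (passB p ((d : ℕ) : Int) L).1) from rfl]
    cases hb : (passB p ((d : ℕ) : Int) L).2 with
    | true =>
      simp only [hb, if_true]
      refine ih _ hI' ?_
      have := htrue hb
      push_cast at hfuel ⊢
      omega
    | false =>
      simp only [hb, Bool.false_eq_true, if_false]
      obtain ⟨hL, hfix⟩ := hfalse hb
      rw [hL]
      have hpt := pv_fix_comp d g hg L hI hfix
      apply List.ext_getElem
      · simp [hI.1]
      · intro y hy1 hy2
        have hyd : y < d := by
          have := hI.1
          omega
        rw [List.getElem_map, List.getElem_range]
        rw [← List.getD_eq_getElem L 0 hy1]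
        exact hpt y hyd

theorem pv_foldl_if_append {α β : Type} (P : α → Prop) [DecidablePred P] (f : α → β) :
    ∀ (l : List α) (init : List β),
      l.foldl (fun acc x => if P x then acc ++ [f x] else acc) init =
      init ++ (l.filter (fun x => decide (P x))).map f := by
  intro l
  induction l with
  | nil => intro init; simp
  | cons a t ih =>
    intro init
    simp only [List.foldl_cons, List.filter_cons]
    by_cases h : P a
    · rw [if_pos h, ih]
      simp [h]
    · rw [if_neg h, ih]
      simp [h]

theorem ofList_comp (g : ℕ → ℕ) :
    ∀ n, PySem.Set.ofList ((List.range n).map (fun y => ((pvComp g y : ℕ) : Int))) =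
      ((List.range n).filter (fun y => decide (pvComp g y = y))).map (fun y => ((y : ℕ) : Int)) := by
  intro n
  induction n with
  | zero => rfl
  | succ n ih =>
    rw [List.range_succ, List.map_append, List.filter_append, List.map_append]
    rw [PySem.Set.ofList_eq_foldl, List.foldl_append, ← PySem.Set.ofList_eq_foldl]
    simp only [List.map_cons, List.map_nil, List.foldl_cons, List.foldl_nil]
    by_cases h : pvComp g n = n
    · have hnot : ((pvComp g n : ℕ) : Int) ∉
          PySem.Set.ofList ((List.range n).map (fun y => ((pvComp g y : ℕ) : Int))) := by
        rw [PySem.Set.mem_ofList]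
        intro hmem
        simp only [List.mem_map, List.mem_range] at hmem
        obtain ⟨y, hy, heq⟩ := hmem
        have : pvComp g y = pvComp g n := by exact_mod_cast heq
        have := pvComp_le_self g y
        omega
      rw [show PySem.Set.add
            (PySem.Set.ofList ((List.range n).map (fun y => ((pvComp g y : ℕ) : Int))))
            ((pvComp g n : ℕ) : Int) =
          PySem.Set.ofList ((List.range n).map (fun y => ((pvComp g y : ℕ) : Int))) ++
            [((pvComp g n : ℕ) : Int)] from by simp [PySem.Set.add, hnot]]
      rw [ih, h]
      simp [h]
    · have hmem : ((pvComp g n : ℕ) : Int) ∈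
          PySem.Set.ofList ((List.range n).map (fun y => ((pvComp g y : ℕ) : Int))) := by
        rw [PySem.Set.mem_ofList]
        simp only [List.mem_map, List.mem_range]
        refine ⟨pvComp g n, ?_, ?_⟩
        · have := pvComp_le_self g n
          omega
        · rw [pvComp_idem]
      rw [show PySem.Set.add
            (PySem.Set.ofList ((List.range n).map (fun y => ((pvComp g y : ℕ) : Int))))
            ((pvComp g n : ℕ) : Int) =
          PySem.Set.ofList ((List.range n).map (fun y => ((pvComp g y : ℕ) : Int))) from by
        simp [PySem.Set.add, hmem]]
      rw [ih]
      simp [h]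

-- the tally of the final labels, leader by leader
theorem tally_spec (d : ℕ) (g : ℕ → ℕ) :
    PySem.Dict.values ((((List.range d).map (fun y => ((pvComp g y : ℕ) : Int))).foldl
      (fun c l => PySem.Dict.insert c l (PySem.Dict.getD c l 0 + 1)) PySem.Dict.empty)) =
    pvSpecL d g d := by
  rw [PySem.Dict.foldl_insert_getD_add_one_eq_counter]
  have hv : PySem.Dict.values (PySem.Dict.counter ((List.range d).map (fun y => ((pvComp g y : ℕ) : Int)))) =
      (PySem.Dict.counter ((List.range d).map (fun y => ((pvComp g y : ℕ) : Int)))).items.map (fun p => p.2) := rfl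
  rw [hv, PySem.Dict.items_counter, ofList_comp, List.map_map, List.map_map]
  have hspec : pvSpecL d g d =
      ((List.range d).filter (fun y => decide (pvComp g y = y))).map
        (fun m => ((pvSize d g m : ℕ) : Int)) := by
    unfold pvSpecL
    rw [pv_foldl_if_append]
    simp
  rw [hspec]
  apply List.map_congr_left
  intro y hy
  simp only [Function.comp_apply]
  congr 1
  rw [List.count, List.countP_map]
  have hcong : ∀ a ∈ List.range d,
      (((fun b => b == ((y : ℕ) : Int)) ∘ (fun z => ((pvComp g z : ℕ) : Int))) a = true ↔
      (fun z => decide (pvComp g z = y)) a = true) := by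
    intro a _
    simp [Nat.cast_inj]
  rw [List.countP_congr hcong]
  rw [List.countP_eq_length_filter]
  rfl

-- ===== putting the two ports together =====

theorem A_eval (pi : List Int) (sigma : List Int) :
    cycle_signature pi sigma =
      PySem.List.sorted
        (((List.range pi.length).foldl
          (fun st (k : ℕ) =>
            stepA (((List.range pi.length).map (fun n : ℕ => (n : Int))).map
              (fun i => PySem.List.pyGetD pi (PySem.List.pyGetD
                ((List.range pi.length).foldl
                  (fun acc (i : ℕ) => PySem.List.pySetD acc (PySem.List.pyGetD sigma ((i : ℕ) : Int) 0) ((i : ℕ) : Int))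
                  (List.replicate pi.length 0)) i 0) 0))
              (pi.length + 1) st ((k : ℕ) : Int))
          (List.replicate pi.length false, ([] : List Int))).2)
        (fun x => x) false := by
  unfold cycle_signature stepA
  simp only [PySem.List.len_eq, Int.toNat_natCast, PySem.List.pyRange_zero_natCast, List.foldl_map]

theorem SI_spec (d : ℕ) (sigma : List Int) (hdlen : d ≤ sigma.length)
    (hσ : ∀ v ∈ sigma.take d, -(d : Int) ≤ v ∧ v < (d : Int)) :
    ∀ n, n ≤ d →
      ((List.range n).foldl
        (fun acc (i : ℕ) => PySem.List.pySetD acc (PySem.List.pyGetD sigma ((i : ℕ) : Int) 0) ((i : ℕ) : Int))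
        (List.replicate d 0)).length = d ∧
      ∀ v ∈ (List.range n).foldl
        (fun acc (i : ℕ) => PySem.List.pySetD acc (PySem.List.pyGetD sigma ((i : ℕ) : Int) 0) ((i : ℕ) : Int))
        (List.replicate d 0), 0 ≤ v ∧ v < (d : Int) := by
  intro n
  induction n with
  | zero =>
    intro _
    refine ⟨by simp, ?_⟩
    intro v hv
    have hd : d ≠ 0 := by
      intro h
      subst h
      simp at hv
    rw [List.eq_of_mem_replicate hv]
    constructor
    · omega
    · exact_mod_cast Nat.pos_of_ne_zero hd
  | succ n ih =>
    intro hn1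
    have hn : n < d := by omega
    obtain ⟨hl, hv⟩ := ih (by omega)
    rw [List.range_succ, List.foldl_append]
    simp only [List.foldl_cons, List.foldl_nil]
    have hw : PySem.List.pyGetD sigma ((n : ℕ) : Int) 0 = sigma.getD n 0 := by simp
    have hwmem : sigma.getD n 0 ∈ sigma.take d := by
      rw [List.getD_eq_getElem sigma 0 (by omega)]
      have hnt : n < (sigma.take d).length := by
        simp
        omega
      have : (sigma.take d)[n]'hnt = sigma[n]'(by omega) := List.getElem_take
      rw [← this]
      exact List.getElem_mem _
    obtain ⟨hw1, hw2⟩ := hσ _ hwmem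
    have hset : PySem.List.pySetD
        ((List.range n).foldl
          (fun acc (i : ℕ) => PySem.List.pySetD acc (PySem.List.pyGetD sigma ((i : ℕ) : Int) 0) ((i : ℕ) : Int))
          (List.replicate d 0))
        (PySem.List.pyGetD sigma ((n : ℕ) : Int) 0) ((n : ℕ) : Int) =
        ((List.range n).foldl
          (fun acc (i : ℕ) => PySem.List.pySetD acc (PySem.List.pyGetD sigma ((i : ℕ) : Int) 0) ((i : ℕ) : Int))
          (List.replicate d 0)).set (pvN d (sigma.getD n 0)) ((n : ℕ) : Int) := by
      rw [hw, pySetD_wrap _ _ _ (by rw [hl]; exact hw1) (by rw [hl]; exact hw2), hl]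
    rw [hset]
    refine ⟨by simpa using hl, ?_⟩
    intro v hv2
    rcases List.mem_or_eq_of_mem_set hv2 with h | h
    · exact hv v h
    · subst h
      constructor
      · positivity
      · exact_mod_cast hn

theorem B_eval (pi : List Int) (sigma : List Int) :
    cycle_signature_alt pi sigma =
      PySem.List.sorted
        (PySem.Dict.values
          ((propagate
            (((List.range pi.length).map (fun n : ℕ => (n : Int))).map
              (fun i => PySem.List.pyGetD pi (PySem.List.pyGetD
                ((List.range pi.length).foldl
                  (fun acc (i : ℕ) => PySem.List.pySetD acc (PySem.List.pyGetD sigma ((i : ℕ) : Int) 0) ((i : ℕ) : Int))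
                  (List.replicate pi.length 0)) i 0) 0))
            ((pi.length : ℕ) : Int) (pi.length * pi.length + 1)
            ((List.range pi.length).map (fun n : ℕ => (n : Int)))).foldl
            (fun c l => PySem.Dict.insert c l (PySem.Dict.getD c l 0 + 1)) PySem.Dict.empty))
        (fun x => x) false := by
  unfold cycle_signature_alt
  simp only [PySem.List.len_eq, Int.toNat_natCast, PySem.List.pyRange_zero_natCast, List.foldl_map]

theorem main_equiv (pi : List Int) (sigma : List Int) (hpre : Pre_cycle_signature pi sigma) :
    cycle_signature pi sigma = cycle_signature_alt pi sigma := by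
  obtain ⟨hdlen, hσ, hπ⟩ := hpre
  rw [A_eval, B_eval]
  set d := pi.length with hd
  obtain ⟨hSIlen, hSIv⟩ := SI_spec d sigma hdlen hσ d le_rfl
  set SI := (List.range d).foldl
      (fun acc (i : ℕ) => PySem.List.pySetD acc (PySem.List.pyGetD sigma ((i : ℕ) : Int) 0) ((i : ℕ) : Int))
      (List.replicate d 0) with hSI
  set P := ((List.range d).map (fun n : ℕ => (n : Int))).map
      (fun i => PySem.List.pyGetD pi (PySem.List.pyGetD SI i 0) 0) with hP
  have hplen : P.length = d := by simp [hP]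
  have hpv : ∀ v ∈ P, -(d : Int) ≤ v ∧ v < (d : Int) := by
    intro v hvmem
    rw [hP] at hvmem
    simp only [List.map_map, List.mem_map, List.mem_range, Function.comp_apply] at hvmem
    obtain ⟨y, hy, rfl⟩ := hvmem
    have hs : PySem.List.pyGetD SI ((y : ℕ) : Int) 0 = SI.getD y 0 := by simp
    have hsmem : SI.getD y 0 ∈ SI := by
      rw [List.getD_eq_getElem SI 0 (by omega)]
      exact List.getElem_mem _
    obtain ⟨hs1, hs2⟩ := hSIv _ hsmem
    rw [hs]
    have hpe : PySem.List.pyGetD pi (SI.getD y 0) 0 = pi[(SI.getD y 0).toNat]'(by omega) :=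
      PySem.List.pyGetD_eq_getElem (xs := pi) (i := SI.getD y 0) (d := 0) hs1 (by omega)
    rw [hpe]
    exact hπ _ (List.getElem_mem _)
  set g := fun x => pvN d (P.getD x 0) with hg_def
  have hgdef : ∀ x, x < d → pvN d (P.getD x 0) = g x := fun x _ => rfl
  have hg : ∀ x, x < d → g x < d := by
    intro x hx
    have hm : P.getD x 0 ∈ P := by
      rw [List.getD_eq_getElem P 0 (by omega)]
      exact List.getElem_mem _
    obtain ⟨h1, h2⟩ := hpv _ hm
    exact pvN_lt d _ h1 h2
  obtain ⟨seen, hfold, _, _⟩ := foldA_inv d g hg P hplen hpv hgdef d le_rfl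
  rw [hfold]
  have hlab0 : pvIlab d g ((List.range d).map (fun n : ℕ => (n : Int))) := by
    refine ⟨by simp, ?_⟩
    intro y hy
    have hgy : ((List.range d).map (fun n : ℕ => (n : Int))).getD y 0 = (y : Int) := by
      rw [List.getD_eq_getElem _ 0 (by simpa using hy)]
      simp
    rw [hgy]
    constructor
    · exact_mod_cast pvComp_le_self g y
    · exact le_refl _
  have hsum0 : ((List.range d).map (fun n : ℕ => (n : Int))).sum < ((d * d + 1 : ℕ) : Int) := by
    have hle : ((List.range d).map (fun n : ℕ => (n : Int))).sum ≤
        ((List.range d).map (fun n : ℕ => (n : Int))).length • ((d : ℕ) : Int) := by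
      apply List.sum_le_card_nsmul
      intro x hx
      simp only [List.mem_map, List.mem_range] at hx
      obtain ⟨n, hn, rfl⟩ := hx
      exact_mod_cast Nat.le_of_lt hn
    simp only [List.length_map, List.length_range, nsmul_eq_mul] at hle
    push_cast at hle ⊢
    nlinarith
  have hprop := propagate_spec d g hg P hplen hpv hgdef (d * d + 1)
    ((List.range d).map (fun n : ℕ => (n : Int))) hlab0 hsum0
  rw [hprop, tally_spec d g]

-- ===== VERDICT (by name: the statement is the Claim_ definition above) =====
theorem cycle_signature_spec : Claim_equal_cycle_signature := by
  intro pi sigma _ hpre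
  show cycle_signature pi sigma = cycle_signature_alt pi sigma
  exact main_equiv pi sigma hpre
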